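-- pv_equiv track=rewrite | github.com/Jmathieu14/qmk_firmware | custom/keymap_json_to_c_layers.py | json_layer_to_c_layer
-- ===== SOURCE A (Python) =====
-- def json_layer_to_c_layer(layer: dict, layer_i: int, row_len=12) -> str:
--     str_to_print = '[' + layer_i.__str__() + '] = LAYOUT( \\\n'
--     for i in range(0, layer.__len__()):
--         str_to_print += layer[i]
--         if i != layer.__len__() - 1:
--             str_to_print += ', '
--         if (i + 1) % row_len == 0:
--             str_to_print += '\ \n'
--     return str_to_print + ')'
-- ===== SOURCE B (Python) =====
-- # B: join-based decomposition — chunk the cells into rows of |row_len| and join,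
-- # instead of A's index loop with per-iteration separator conditionals.
-- def _rows(cells, k):
--     if len(cells) <= k:
--         return [cells]
--     return [cells[:k]] + _rows(cells[k:], k)
--
-- def json_layer_to_c_layer(layer, layer_i, row_len=12):
--     cells = [layer[i] for i in range(len(layer))]
--     body = ', \\ \n'.join(', '.join(r) for r in _rows(cells, abs(row_len)))
--     if cells and len(cells) % row_len == 0:
--         body += '\\ \n'
--     return '[' + str(layer_i) + '] = LAYOUT( \\\n' + body + ')'
-- ===== Notes on version B (the rewrite author's own statement) =====
-- stated objective: alternative
-- what changed: A builds the string in one index loop deciding separators per iteration; B first materialises the cell list, chunks it into rows of |row_len| and joins rows with ', ' / ', \ \n', appending the trailing line break only when the cell count is a nonzero multiple of row_len.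
import Mathlib
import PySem

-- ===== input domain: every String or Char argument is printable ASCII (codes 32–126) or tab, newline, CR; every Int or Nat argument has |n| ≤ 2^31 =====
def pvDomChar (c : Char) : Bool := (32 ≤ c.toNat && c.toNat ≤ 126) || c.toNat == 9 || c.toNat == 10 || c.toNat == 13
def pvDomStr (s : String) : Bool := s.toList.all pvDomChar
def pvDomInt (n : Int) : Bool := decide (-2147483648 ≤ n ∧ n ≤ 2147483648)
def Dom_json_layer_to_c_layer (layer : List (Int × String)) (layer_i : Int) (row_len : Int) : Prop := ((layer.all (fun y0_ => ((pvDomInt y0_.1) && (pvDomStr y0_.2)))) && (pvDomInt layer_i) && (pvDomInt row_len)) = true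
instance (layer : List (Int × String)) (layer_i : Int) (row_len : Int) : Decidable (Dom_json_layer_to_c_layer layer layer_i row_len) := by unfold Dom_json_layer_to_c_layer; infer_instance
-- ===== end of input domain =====

-- B rebuilds the string by chunking the cells into rows of |row_len| and joining them,
-- instead of A's single index loop with per-iteration separator conditionals (objective: alternative decomposition).

-- ===== PORT A =====
def json_layer_to_c_layer (layer : List (Int × String)) (layer_i : Int) (row_len : Int) : String :=
  let d := PySem.Dict.ofList layer
  let n : Int := (d.size : Int)
  ((PySem.List.pyRange 0 n).foldl (fun s i =>
      let s1 := s ++ d.getD i ""            -- layer[i]; total form, Pre_ guarantees the key is present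
      let s2 := if i ≠ n - 1 then s1 ++ ", " else s1
      if PySem.Int.mod (i + 1) row_len = 0 then s2 ++ "\\ \n" else s2)
    ("[" ++ PySem.Int.toStr layer_i ++ "] = LAYOUT( \\\n")) ++ ")"

-- ===== PORT B =====
-- _rows of Source B; fuel (= initial cells.length) only makes the recursion total in Lean
-- (Source B diverges only when row_len = 0 and cells ≠ [], which Pre_ excludes).
def altRows (fuel : Nat) (cells : List String) (k : Nat) : List (List String) :=
  match fuel with
  | 0 => [cells]
  | f + 1 => if cells.length ≤ k then [cells] else cells.take k :: altRows f (cells.drop k) k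

def json_layer_to_c_layer_alt (layer : List (Int × String)) (layer_i : Int) (row_len : Int) : String :=
  let d := PySem.Dict.ofList layer
  let cells := (PySem.List.pyRange 0 ((d.size : Int))).map (fun i => d.getD i "")
  let body := PySem.Str.join ", \\ \n" ((altRows cells.length cells row_len.natAbs).map (PySem.Str.join ", "))
  let body := if cells ≠ [] ∧ PySem.Int.mod ((cells.length : Int)) row_len = 0 then body ++ "\\ \n" else body
  "[" ++ PySem.Int.toStr layer_i ++ "] = LAYOUT( \\\n" ++ body ++ ")"

-- ===== PRECONDITION & SPEC =====
-- Pre_ excludes exactly the inputs where the Python A raises: a KeyError when some index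
-- 0..len(layer)-1 is not a key of the dict, and a ZeroDivisionError when row_len = 0 and
-- the dict is nonempty (there B diverges as well).
def Pre_json_layer_to_c_layer (layer : List (Int × String)) (layer_i : Int) (row_len : Int) : Prop :=
  (∀ i ∈ List.range (PySem.Dict.ofList layer).size, (PySem.Dict.ofList layer).contains ((i : Int)) = true)
  ∧ (layer = [] ∨ row_len ≠ 0)
instance (layer : List (Int × String)) (layer_i : Int) (row_len : Int) : Decidable (Pre_json_layer_to_c_layer layer layer_i row_len) := by
  unfold Pre_json_layer_to_c_layer; infer_instance

def pvWitness_json_layer_to_c_layer : (List (Int × String)) × Int × Int :=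
  ([(0, "KC_A"), (1, "KC_B"), (2, "KC_C")], 1, 2)

def Spec_json_layer_to_c_layer (layer : List (Int × String)) (layer_i : Int) (row_len : Int) (out : String) : Prop := out = json_layer_to_c_layer_alt layer layer_i row_len
instance (layer : List (Int × String)) (layer_i : Int) (row_len : Int) (out : String) : Decidable (Spec_json_layer_to_c_layer layer layer_i row_len out) := by unfold Spec_json_layer_to_c_layer; infer_instance

-- ===== CLAIM (what is proved, stated in full; the proofs are below) =====
def Claim_equal_json_layer_to_c_layer : Prop := ∀ (layer : List (Int × String)) (layer_i : Int) (row_len : Int), Dom_json_layer_to_c_layer layer layer_i row_len → Pre_json_layer_to_c_layer layer layer_i row_len → Spec_json_layer_to_c_layer layer layer_i row_len (json_layer_to_c_layer layer layer_i row_len)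

-- ===== LEMMAS AND PROOFS =====

-- String facts
theorem strApp_assoc (a b c : String) : (a ++ b) ++ c = a ++ (b ++ c) := by
  apply String.ext; simp

theorem strApp_empty (a : String) : a ++ "" = a := by
  apply String.ext; simp

theorem strJoin_nil (sep : String) : PySem.Str.join sep [] = "" := by
  apply String.ext; simp [PySem.Str.toList_join, PySem.Chars.join_nil]

theorem strJoin_singleton (sep p : String) : PySem.Str.join sep [p] = p := by
  apply String.ext; simp [PySem.Str.toList_join, PySem.Chars.join_singleton]

theorem strJoin_cons_cons (sep p q : String) (rest : List String) :
    PySem.Str.join sep (p :: q :: rest) = p ++ sep ++ PySem.Str.join sep (q :: rest) := by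
  apply String.ext; simp [PySem.Str.toList_join, PySem.Chars.join_cons_cons]

-- A's loop body, with the divisibility test in place of `% row_len == 0`
def stepF (f : Int → String) (n : Int) (k0 : Nat) : String → Int → String :=
  fun s i =>
    let s1 := s ++ f i
    let s2 := if i ≠ n - 1 then s1 ++ ", " else s1
    if ((k0 : Int)) ∣ (i + 1) then s2 ++ "\\ \n" else s2

theorem altRows_of_le (fuel : Nat) (cells : List String) (k : Nat) (h : cells.length ≤ k) :
    altRows fuel cells k = [cells] := by
  cases fuel with
  | zero => rfl
  | succ f =>
    show (if cells.length ≤ k then [cells] else cells.take k :: altRows f (cells.drop k) k) = [cells]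
    rw [if_pos h]

theorem altRows_step (f : Nat) (cells : List String) (k : Nat) (h : k < cells.length) :
    altRows (f + 1) cells k = cells.take k :: altRows f (cells.drop k) k := by
  show (if cells.length ≤ k then [cells] else cells.take k :: altRows f (cells.drop k) k) = _
  rw [if_neg (by omega)]

theorem altRows_ne_nil (fuel : Nat) (cells : List String) (k : Nat) :
    altRows fuel cells k ≠ [] := by
  cases fuel with
  | zero => simp [altRows]
  | succ f =>
    by_cases h : cells.length ≤ k
    · rw [altRows_of_le _ _ _ h]; simp
    · rw [altRows_step _ _ _ (by omega)]; simp

theorem altRows_fuel (f1 : Nat) : ∀ (f2 : Nat) (cells : List String) (k : Nat), 1 ≤ k →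
    cells.length ≤ f1 → cells.length ≤ f2 → altRows f1 cells k = altRows f2 cells k := by
  induction f1 with
  | zero =>
    intro f2 cells k hk h1 h2
    have hc : cells = [] := List.eq_nil_of_length_eq_zero (Nat.le_zero.mp h1)
    subst hc
    rw [altRows_of_le _ _ _ (by simp), altRows_of_le _ _ _ (by simp)]
  | succ f1' ih =>
    intro f2 cells k hk h1 h2
    by_cases hle : cells.length ≤ k
    · rw [altRows_of_le _ _ _ hle, altRows_of_le _ _ _ hle]
    · have hlt : k < cells.length := by omega
      cases f2 with
      | zero => omega
      | succ f2' =>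
        rw [altRows_step _ _ _ hlt, altRows_step _ _ _ hlt]
        have hd : (cells.drop k).length = cells.length - k := by simp
        rw [ih f2' (cells.drop k) k hk (by omega) (by omega)]

-- Segment with no interior row break: cells joined by ", ", plus the break after the
-- final element when it closes a row at the very end of the layer.
theorem segB1 (f : Int → String) (n : Int) (k0 : Nat) :
    ∀ (m : Nat) (a : Int) (s : String), a + m = n →
    (∀ j : Int, a ≤ j → j < n - 1 → ¬ ((k0 : Int) ∣ (j + 1))) →
    (PySem.List.pyRange a n).foldl (stepF f n k0) s
      = s ++ PySem.Str.join ", " ((PySem.List.pyRange a n).map f)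
          ++ (if a < n ∧ ((k0 : Int)) ∣ n then "\\ \n" else "") := by
  intro m
  induction m with
  | zero =>
    intro a s ha hb
    rw [PySem.List.pyRange_one_eq_nil (by omega)]
    simp only [List.foldl_nil, List.map_nil, strJoin_nil]
    rw [if_neg (by omega), strApp_empty, strApp_empty]
  | succ m' ih =>
    intro a s ha hb
    have hlt : a < n := by omega
    rw [PySem.List.pyRange_one_cons hlt]
    simp only [List.foldl_cons, List.map_cons]
    by_cases hlast : a = n - 1
    · -- last element: no ", ", break iff k0 ∣ n
      have hm0 : m' = 0 := by omega
      rw [PySem.List.pyRange_one_eq_nil (by omega)]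
      have hstep : stepF f n k0 s a
          = if ((k0 : Int)) ∣ (a + 1) then s ++ f a ++ "\\ \n" else s ++ f a := by
        simp only [stepF]
        rw [if_neg (by omega : ¬ a ≠ n - 1)]
      rw [List.foldl_nil, List.map_nil, hstep, strJoin_singleton,
        (by omega : a + 1 = n),
        if_congr (show (a < n ∧ ((k0 : Int)) ∣ n) ↔ ((k0 : Int)) ∣ n from
          ⟨fun h => h.2, fun h => ⟨hlt, h⟩⟩) rfl rfl]
      split_ifs with h
      · rw [strApp_assoc]
      · rw [strApp_empty]
    · -- interior element of the final partial row: ", " and no break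
      have hstep : stepF f n k0 s a = s ++ f a ++ ", " := by
        simp only [stepF]
        rw [if_pos hlast, if_neg (hb a le_rfl (by omega))]
      rw [hstep, ih (a + 1) _ (by omega) (fun j h1 h2 => hb j (by omega) h2)]
      have hne : a + 1 < n := by omega
      rw [PySem.List.pyRange_one_cons hne, List.map_cons, strJoin_cons_cons]
      have hiff : (a + 1 < n ∧ ((k0 : Int)) ∣ n) ↔ (a < n ∧ ((k0 : Int)) ∣ n) := by
        constructor <;> rintro ⟨h1, h2⟩ <;> exact ⟨by omega, h2⟩
      rw [if_congr hiff rfl rfl]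
      simp only [strApp_assoc]

-- A full row strictly before the end: cells joined by ", ", then ", " and the row break.
theorem segB2 (f : Int → String) (n : Int) (k0 : Nat) :
    ∀ (m : Nat) (a : Int) (s : String), 0 < m → a + m < n → ((k0 : Int)) ∣ (a + m) →
    (∀ j : Int, a ≤ j → j < a + m - 1 → ¬ ((k0 : Int) ∣ (j + 1))) →
    (PySem.List.pyRange a (a + m)).foldl (stepF f n k0) s
      = s ++ PySem.Str.join ", " ((PySem.List.pyRange a (a + m)).map f) ++ ", \\ \n" := by
  intro m
  induction m with
  | zero => intro a s h; omega
  | succ m' ih =>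
    intro a s hpos hend hdvd hb
    have hlt : a < a + ((m' + 1 : Nat) : Int) := by push_cast; omega
    rw [PySem.List.pyRange_one_cons hlt]
    simp only [List.foldl_cons, List.map_cons]
    cases Nat.eq_zero_or_pos m' with
    | inl hm0 =>
      subst hm0
      have hdd : ((k0 : Int)) ∣ (a + 1) := by simpa using hdvd
      have hstep : stepF f n k0 s a = s ++ f a ++ ", " ++ "\\ \n" := by
        simp only [stepF]
        rw [if_pos (by omega : a ≠ n - 1), if_pos hdd]
      rw [hstep, PySem.List.pyRange_one_eq_nil (by push_cast; omega)]
      simp only [List.foldl_nil, List.map_nil, strJoin_singleton]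
      have hcomma : (", " : String) ++ "\\ \n" = ", \\ \n" := by apply String.ext; simp
      rw [strApp_assoc, hcomma]
    | inr hm' =>
      have harg : a + ((m' + 1 : Nat) : Int) = (a + 1) + ((m' : Nat) : Int) := by push_cast; ring
      rw [harg] at hdvd hend ⊢
      have hstep : stepF f n k0 s a = s ++ f a ++ ", " := by
        simp only [stepF]
        rw [if_pos (by omega : a ≠ n - 1), if_neg (hb a le_rfl (by omega))]
      rw [hstep, ih (a + 1) _ hm' hend hdvd (fun j h1 h2 => hb j (by omega) (by omega))]
      have hne : a + 1 < (a + 1) + ((m' : Nat) : Int) := by omega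
      rw [PySem.List.pyRange_one_cons hne, List.map_cons, strJoin_cons_cons]
      simp only [strApp_assoc]

-- Main invariant: processing indices [a, n) with k0 ∣ a yields the chunked-row rendering.
theorem segC (f : Int → String) (n : Int) (k0 : Nat) (hk : 1 ≤ k0) :
    ∀ (m : Nat) (a : Int) (s : String), a + m = n → ((k0 : Int)) ∣ a →
    (PySem.List.pyRange a n).foldl (stepF f n k0) s
      = s ++ PySem.Str.join ", \\ \n"
              ((altRows ((PySem.List.pyRange a n).map f).length ((PySem.List.pyRange a n).map f) k0).map
                (PySem.Str.join ", "))
          ++ (if a < n ∧ ((k0 : Int)) ∣ n then "\\ \n" else "") := by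
  intro m
  induction m using Nat.strong_induction_on with
  | _ m ih =>
    intro a s ha hdvd
    have hlen : ((PySem.List.pyRange a n).map f).length = m := by
      simp [PySem.List.length_pyRange_one]; omega
    by_cases hsmall : m ≤ k0
    · -- final (possibly partial) row
      rw [altRows_of_le _ _ _ (by omega), List.map_cons, List.map_nil, strJoin_singleton]
      apply segB1 f n k0 m a s ha
      intro j h1 h2 hcon
      have h3 : ((k0 : Int)) ∣ (j + 1 - a) := Int.dvd_sub hcon hdvd
      have h4 : (k0 : Int) ≤ j + 1 - a := Int.le_of_dvd (by omega) h3
      omega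
    · -- full row then recurse
      have hk0n : a + ((k0 : Nat) : Int) ≤ n := by omega
      have hsplit : PySem.List.pyRange a n
          = PySem.List.pyRange a (a + ((k0 : Nat) : Int)) ++ PySem.List.pyRange (a + ((k0 : Nat) : Int)) n :=
        PySem.List.pyRange_one_append a (a + ((k0 : Nat) : Int)) n (by omega) hk0n
      rw [hsplit, List.foldl_append, ← hsplit]
      rw [segB2 f n k0 k0 a s (by omega) (by omega) (dvd_add hdvd (dvd_refl _)) ?hb]
      case hb =>
        intro j h1 h2 hcon
        have h3 : ((k0 : Int)) ∣ (j + 1 - a) := Int.dvd_sub hcon hdvd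
        have h4 : (k0 : Int) ≤ j + 1 - a := Int.le_of_dvd (by omega) h3
        omega
      rw [ih (m - k0) (by omega) (a + ((k0 : Nat) : Int)) _ (by omega)
        (dvd_add hdvd (dvd_refl _))]
      -- assemble the right-hand side
      have hrowlen : ((PySem.List.pyRange a (a + ((k0 : Nat) : Int))).map f).length = k0 := by
        simp [PySem.List.length_pyRange_one]
      have hmap : ((PySem.List.pyRange a n).map f)
          = (PySem.List.pyRange a (a + ((k0 : Nat) : Int))).map f
            ++ (PySem.List.pyRange (a + ((k0 : Nat) : Int)) n).map f := by
        rw [hsplit, List.map_append]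
      have hrest : ((PySem.List.pyRange (a + ((k0 : Nat) : Int)) n).map f).length = m - k0 := by
        simp [PySem.List.length_pyRange_one]; omega
      obtain ⟨m', hm'⟩ : ∃ m', m = m' + 1 := ⟨m - 1, by omega⟩
      have hunfold : altRows ((PySem.List.pyRange a n).map f).length ((PySem.List.pyRange a n).map f) k0
          = ((PySem.List.pyRange a (a + ((k0 : Nat) : Int))).map f)
            :: altRows (((PySem.List.pyRange (a + ((k0 : Nat) : Int)) n).map f).length)
                 ((PySem.List.pyRange (a + ((k0 : Nat) : Int)) n).map f) k0 := by
        rw [hlen, hm', altRows_step m' _ _ (by omega)]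
        congr 1
        · rw [hmap, List.take_left' hrowlen]
        · rw [hmap, List.drop_left' hrowlen]
          apply altRows_fuel _ _ _ _ hk (by rw [hrest]; omega) le_rfl
      rw [hunfold, List.map_cons]
      obtain ⟨q, rest, hqr⟩ : ∃ q rest,
          (altRows (((PySem.List.pyRange (a + ((k0 : Nat) : Int)) n).map f).length)
            ((PySem.List.pyRange (a + ((k0 : Nat) : Int)) n).map f) k0).map (PySem.Str.join ", ")
          = q :: rest := by
        rcases h : altRows (((PySem.List.pyRange (a + ((k0 : Nat) : Int)) n).map f).length)
            ((PySem.List.pyRange (a + ((k0 : Nat) : Int)) n).map f) k0 with _ | ⟨x, xs⟩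
        · exact absurd h (altRows_ne_nil _ _ _)
        · exact ⟨PySem.Str.join ", " x, xs.map _, rfl⟩
      rw [hqr, strJoin_cons_cons, ← hqr]
      have hiff : (a + ((k0 : Nat) : Int) < n ∧ ((k0 : Int)) ∣ n) ↔ (a < n ∧ ((k0 : Int)) ∣ n) := by
        constructor <;> rintro ⟨h1, h2⟩ <;> exact ⟨by omega, h2⟩
      rw [if_congr hiff rfl rfl]
      simp only [strApp_assoc]

-- Bridge: both ports, with the dict abstracted, agree when row_len ≠ 0.
theorem bridge (d : PySem.Dict Int String) (layer_i row_len : Int) (hr : row_len ≠ 0) :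
    ((PySem.List.pyRange 0 ((d.size : Nat) : Int)).foldl
        (fun (s : String) (i : Int) =>
          let s1 := s ++ d.getD i ""
          let s2 := if i ≠ ((d.size : Nat) : Int) - 1 then s1 ++ ", " else s1
          if PySem.Int.mod (i + 1) row_len = 0 then s2 ++ "\\ \n" else s2)
        ("[" ++ PySem.Int.toStr layer_i ++ "] = LAYOUT( \\\n")) ++ ")"
    = (let cells := (PySem.List.pyRange 0 ((d.size : Nat) : Int)).map (fun i => d.getD i "")
       let body := PySem.Str.join ", \\ \n"
         ((altRows cells.length cells row_len.natAbs).map (PySem.Str.join ", "))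
       let body2 := if cells ≠ [] ∧ PySem.Int.mod ((cells.length : Int)) row_len = 0
         then body ++ "\\ \n" else body
       "[" ++ PySem.Int.toStr layer_i ++ "] = LAYOUT( \\\n" ++ body2 ++ ")") := by
  have hstep : (fun (s : String) (i : Int) =>
        let s1 := s ++ d.getD i ""
        let s2 := if i ≠ ((d.size : Nat) : Int) - 1 then s1 ++ ", " else s1
        if PySem.Int.mod (i + 1) row_len = 0 then s2 ++ "\\ \n" else s2)
      = stepF (fun i => d.getD i "") ((d.size : Nat) : Int) row_len.natAbs := by
    funext s i
    simp only [stepF]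
    rw [if_congr ((PySem.Int.mod_eq_zero_iff_dvd _ _).trans Int.natAbs_dvd.symm) rfl rfl]
  show _ = ("[" ++ PySem.Int.toStr layer_i ++ "] = LAYOUT( \\\n"
      ++ (if (PySem.List.pyRange 0 ((d.size : Nat) : Int)).map (fun i => d.getD i "") ≠ []
            ∧ PySem.Int.mod ((((PySem.List.pyRange 0 ((d.size : Nat) : Int)).map
                (fun i => d.getD i "")).length : Int)) row_len = 0
          then PySem.Str.join ", \\ \n"
              ((altRows ((PySem.List.pyRange 0 ((d.size : Nat) : Int)).map (fun i => d.getD i "")).length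
                  ((PySem.List.pyRange 0 ((d.size : Nat) : Int)).map (fun i => d.getD i ""))
                  row_len.natAbs).map (PySem.Str.join ", ")) ++ "\\ \n"
          else PySem.Str.join ", \\ \n"
              ((altRows ((PySem.List.pyRange 0 ((d.size : Nat) : Int)).map (fun i => d.getD i "")).length
                  ((PySem.List.pyRange 0 ((d.size : Nat) : Int)).map (fun i => d.getD i ""))
                  row_len.natAbs).map (PySem.Str.join ", ")))
      ++ ")")
  rw [hstep,
    segC (fun i => d.getD i "") ((d.size : Nat) : Int) row_len.natAbs (by omega)
      d.size 0 _ (by simp) (dvd_zero _)]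
  have hcells : ((PySem.List.pyRange 0 ((d.size : Nat) : Int)).map (fun i => d.getD i "")).length
      = d.size := by
    simp [PySem.List.length_pyRange_one]
  have hcond : ((0 : Int) < ((d.size : Nat) : Int)
        ∧ ((row_len.natAbs : Int)) ∣ ((d.size : Nat) : Int))
      ↔ ((PySem.List.pyRange 0 ((d.size : Nat) : Int)).map (fun i => d.getD i "") ≠ []
        ∧ PySem.Int.mod ((((PySem.List.pyRange 0 ((d.size : Nat) : Int)).map
            (fun i => d.getD i "")).length : Int)) row_len = 0) := by
    rw [hcells, PySem.Int.mod_eq_zero_iff_dvd, ← List.length_pos_iff_ne_nil, hcells]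
    constructor
    · rintro ⟨h1, h2⟩; exact ⟨by omega, Int.natAbs_dvd.mp h2⟩
    · rintro ⟨h1, h2⟩; exact ⟨by omega, Int.natAbs_dvd.mpr h2⟩
  rw [if_congr hcond.symm rfl rfl]
  split_ifs with h
  · simp only [strApp_assoc]
  · rw [strApp_empty]

-- ===== VERDICT (by name: the statement is the Claim_ definition above) =====
theorem json_layer_to_c_layer_spec : Claim_equal_json_layer_to_c_layer := by
  intro layer layer_i row_len _ hpre
  unfold Spec_json_layer_to_c_layer
  rcases hpre with ⟨-, hz⟩
  by_cases hr : row_len = 0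
  · have hl : layer = [] := by tauto
    subst hl hr
    apply String.ext
    simp [json_layer_to_c_layer, json_layer_to_c_layer_alt,
      PySem.List.pyRange_one_eq_nil, altRows, strJoin_singleton]
  · exact bridge (PySem.Dict.ofList layer) layer_i row_len hr
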